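-- pv_equiv track=rewrite | github.com/Akashbellary/MailManager-application | emailflow/services/search_service.py | _apply_filters
-- ===== SOURCE A (Python) =====
-- from typing import Dict, List, Optional, Any
--
-- def _apply_filters(emails: List[Dict], filters: Dict[str, List[str]], sender_filters: List[str]) -> List[Dict]:
--     """
--     Apply filters to email list
--     """
--     filtered_emails = emails.copy()
--
--     # Apply field filters
--     for field, values in filters.items():
--         if values:
--             filtered_emails = [email for email in filtered_emails if email.get(field) in values]
--
--     # Apply sender filters
--     if sender_filters:
--         filtered_emails = [
--             email for email in filtered_emails
--             if any(sender.lower() in email.get('sender', '').lower() for sender in sender_filters)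
--         ]
--
--     return filtered_emails
-- ===== SOURCE B (Python) =====
-- from typing import Dict, List
--
--
-- def _apply_filters(emails: List[Dict], filters: Dict[str, List[str]], sender_filters: List[str]) -> List[Dict]:
--     """Single pass: one combined per-email predicate instead of successive filtered lists."""
--     def keep(email):
--         for field, values in filters.items():
--             if values and email.get(field) not in values:
--                 return False
--         return (not sender_filters) or any(
--             s.lower() in email.get('sender', '').lower() for s in sender_filters
--         )
--
--     return [email for email in emails if keep(email)]
-- ===== Notes on version B (the rewrite author's own statement) =====
-- stated objective: simpler
-- what changed: A builds a new intermediate filtered list per non-empty filter field and then a further list for sender filters; B makes a single pass over emails with one combined per-email predicate (field memberships plus sender substring check), building the output once.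
import Mathlib
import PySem

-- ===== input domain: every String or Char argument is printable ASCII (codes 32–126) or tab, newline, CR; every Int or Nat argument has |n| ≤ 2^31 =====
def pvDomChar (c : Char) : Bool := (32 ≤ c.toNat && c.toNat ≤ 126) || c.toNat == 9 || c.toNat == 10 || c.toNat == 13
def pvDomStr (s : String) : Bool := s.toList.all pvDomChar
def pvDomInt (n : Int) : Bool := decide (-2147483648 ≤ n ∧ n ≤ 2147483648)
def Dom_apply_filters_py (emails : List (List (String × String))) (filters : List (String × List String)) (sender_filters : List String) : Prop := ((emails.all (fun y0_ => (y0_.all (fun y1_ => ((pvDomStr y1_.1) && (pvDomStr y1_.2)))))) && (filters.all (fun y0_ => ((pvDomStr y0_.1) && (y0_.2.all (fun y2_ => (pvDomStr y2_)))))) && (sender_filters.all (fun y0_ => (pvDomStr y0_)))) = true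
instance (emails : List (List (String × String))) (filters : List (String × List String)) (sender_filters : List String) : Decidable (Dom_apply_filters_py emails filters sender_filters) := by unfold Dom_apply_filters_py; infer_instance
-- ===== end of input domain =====

-- B replaces A's chain of intermediate filtered lists by a single pass with one combined
-- per-email predicate (objective: simpler; same asymptotic cost).

-- shared sub-expressions of both Pythons: 'email.get(field) in values' and the sender test
def pvFieldHit (field : String) (values : List String) (email : List (String × String)) : Bool :=
  values.any (fun v => PySem.Dict.get? (PySem.Dict.mk email) field == some v)

def pvSenderHit (sender_filters : List String) (email : List (String × String)) : Bool :=
  sender_filters.any (fun s =>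
    PySem.Str.isIn (PySem.Str.lower s)
      (PySem.Str.lower (PySem.Dict.getD (PySem.Dict.mk email) "sender" "")))

-- ===== PORT A =====
def apply_filters_py (emails : List (List (String × String))) (filters : List (String × List String)) (sender_filters : List String) : List (List (String × String)) :=
  let filtered := filters.foldl
    (fun acc fv => if fv.2.isEmpty then acc else acc.filter (pvFieldHit fv.1 fv.2)) emails
  if sender_filters.isEmpty then filtered else filtered.filter (pvSenderHit sender_filters)

-- ===== PORT B =====
def pvKeep (filters : List (String × List String)) (sender_filters : List String) (email : List (String × String)) : Bool :=
  filters.all (fun fv => fv.2.isEmpty || pvFieldHit fv.1 fv.2 email) &&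
  (sender_filters.isEmpty || pvSenderHit sender_filters email)

def apply_filters_py_alt (emails : List (List (String × String))) (filters : List (String × List String)) (sender_filters : List String) : List (List (String × String)) :=
  emails.filter (pvKeep filters sender_filters)

-- ===== PRECONDITION & SPEC =====
def Spec_apply_filters_py (emails : List (List (String × String))) (filters : List (String × List String)) (sender_filters : List String) (out : List (List (String × String))) : Prop := out = apply_filters_py_alt emails filters sender_filters
instance (emails : List (List (String × String))) (filters : List (String × List String)) (sender_filters : List String) (out : List (List (String × String))) : Decidable (Spec_apply_filters_py emails filters sender_filters out) := by unfold Spec_apply_filters_py; infer_instance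

-- ===== CLAIM (what is proved, stated in full; the proofs are below) =====
def Claim_equal_apply_filters_py : Prop := ∀ (emails : List (List (String × String))) (filters : List (String × List String)) (sender_filters : List String), Dom_apply_filters_py emails filters sender_filters → Spec_apply_filters_py emails filters sender_filters (apply_filters_py emails filters sender_filters)

-- ===== LEMMAS AND PROOFS =====

-- A's successive field passes equal one filter by the conjunction of the field tests
theorem foldl_fieldFilter_eq (filters : List (String × List String)) (emails : List (List (String × String))) :
    filters.foldl (fun acc fv => if fv.2.isEmpty then acc else acc.filter (pvFieldHit fv.1 fv.2)) emails
      = emails.filter (fun e => filters.all (fun fv => fv.2.isEmpty || pvFieldHit fv.1 fv.2 e)) := by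
  induction filters generalizing emails with
  | nil => simp
  | cons fv fs ih =>
    simp only [List.foldl_cons, ih, List.all_cons]
    by_cases h : fv.2.isEmpty
    · simp [h]
    · simp only [if_neg h, List.filter_filter]
      congr 1
      funext e
      simp [h, Bool.and_comm]

theorem apply_filters_py_spec : Claim_equal_apply_filters_py := by
  intro emails filters sender_filters _
  show _ = _
  simp only [apply_filters_py, apply_filters_py_alt, foldl_fieldFilter_eq]
  by_cases h : sender_filters.isEmpty
  · simp only [if_pos h]
    congr 1
    funext e
    simp [pvKeep, h]
  · simp only [if_neg h, List.filter_filter]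
    congr 1
    funext e
    simp [pvKeep, h, Bool.and_comm]
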